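-- pv_equiv track=rewrite | github.com/jcolinpatrick/kryptos | scripts/grille/blitz_grille_geometry_v9.py | shells_order
-- ===== SOURCE A (Python) =====
-- def shells_order(nrows, ncols, holes_set):
--     result = []
--     top, bottom, left, right = 0, nrows-1, 0, ncols-1
--     while top <= bottom and left <= right:
--         for c in range(left, right+1):
--             if (top, c) in holes_set: result.append((top, c))
--         for r in range(top+1, bottom+1):
--             if (r, right) in holes_set: result.append((r, right))
--         if top < bottom:
--             for c in range(right-1, left-1, -1):
--                 if (bottom, c) in holes_set: result.append((bottom, c))
--         if left < right:
--             for r in range(bottom-1, top, -1):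
--                 if (r, left) in holes_set: result.append((r, left))
--         top += 1; bottom -= 1; left += 1; right -= 1
--     return result
-- ===== SOURCE B (Python) =====
-- def _spiral_index(nrows, ncols, r, c):
--     # shell number and position within the shell's perimeter, O(1)
--     k = min(r, c, nrows - 1 - r, ncols - 1 - c)
--     m = nrows - 2 * k          # shell height
--     n = ncols - 2 * k          # shell width
--     off = nrows * ncols - m * n  # cells in outer shells
--     rr = r - k
--     cc = c - k
--     if rr == 0:
--         pos = cc
--     elif cc == n - 1:
--         pos = n - 1 + rr
--     elif rr == m - 1:
--         pos = n + m - 2 + (n - 1 - cc)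
--     else:
--         pos = 2 * n + m - 3 + (m - 1 - rr)
--     return off + pos
--
-- def shells_order(nrows, ncols, holes_set):
--     seen = set()
--     cells = []
--     for rc in holes_set:
--         r, c = rc
--         if 0 <= r < nrows and 0 <= c < ncols and rc not in seen:
--             seen.add(rc)
--             cells.append(rc)
--     cells.sort(key=lambda rc: _spiral_index(nrows, ncols, rc[0], rc[1]))
--     return cells
-- ===== Notes on version B (the rewrite author's own statement) =====
-- stated objective: faster
-- what changed: A walks every cell of the nrows x ncols grid shell by shell testing each cell against the holes list; B computes each in-grid hole's spiral-order index with a closed-form O(1) formula and sorts the deduplicated holes by that index, never touching the grid.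
import Mathlib
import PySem

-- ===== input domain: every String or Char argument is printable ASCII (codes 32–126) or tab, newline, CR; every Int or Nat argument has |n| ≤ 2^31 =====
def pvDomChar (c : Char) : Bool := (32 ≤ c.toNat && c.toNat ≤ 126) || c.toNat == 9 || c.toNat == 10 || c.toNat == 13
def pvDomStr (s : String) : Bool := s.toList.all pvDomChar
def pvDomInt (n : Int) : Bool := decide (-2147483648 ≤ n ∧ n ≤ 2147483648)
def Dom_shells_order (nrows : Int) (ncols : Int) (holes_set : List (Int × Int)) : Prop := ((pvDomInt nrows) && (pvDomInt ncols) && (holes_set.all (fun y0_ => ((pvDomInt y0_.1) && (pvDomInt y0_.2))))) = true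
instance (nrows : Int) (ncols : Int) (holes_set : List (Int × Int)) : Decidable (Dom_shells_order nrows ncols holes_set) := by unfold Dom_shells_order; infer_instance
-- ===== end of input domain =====

-- B replaces A's O(nrows*ncols*H) spiral scan with an O(1) closed-form spiral index per hole
-- plus a sort of the holes by that index (O(H log H), independent of the grid size).

-- ===== PORT A =====
-- transliteration of A's while loop; result is the accumulator threaded through the four for-loops
def shellsLoopA (holes : List (Int × Int)) (top bottom left right : Int)
    (result : List (Int × Int)) : List (Int × Int) :=
  if top ≤ bottom ∧ left ≤ right then
    let r1 := (PySem.List.pyRange left (right + 1) 1).foldl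
      (fun acc c => if (top, c) ∈ holes then acc ++ [(top, c)] else acc) result
    let r2 := (PySem.List.pyRange (top + 1) (bottom + 1) 1).foldl
      (fun acc r => if (r, right) ∈ holes then acc ++ [(r, right)] else acc) r1
    let r3 := if top < bottom then
        (PySem.List.pyRange (right - 1) (left - 1) (-1)).foldl
          (fun acc c => if (bottom, c) ∈ holes then acc ++ [(bottom, c)] else acc) r2
      else r2
    let r4 := if left < right then
        (PySem.List.pyRange (bottom - 1) top (-1)).foldl
          (fun acc r => if (r, left) ∈ holes then acc ++ [(r, left)] else acc) r3
      else r3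
    shellsLoopA holes (top + 1) (bottom - 1) (left + 1) (right - 1) r4
  else result
termination_by (bottom - top + 1).toNat
decreasing_by exact (Int.toNat_lt_toNat (by omega)).2 (by omega)

def shells_order (nrows : Int) (ncols : Int) (holes_set : List (Int × Int)) : List (Int × Int) :=
  shellsLoopA holes_set 0 (nrows - 1) 0 (ncols - 1) []

-- ===== PORT B =====
-- O(1) spiral-order index of cell (r, c) in an nrows × ncols grid (port of _spiral_index)
def spiralIndex (nrows ncols r c : Int) : Int :=
  let k := min (min (min r c) (nrows - 1 - r)) (ncols - 1 - c)
  let m := nrows - 2 * k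
  let n := ncols - 2 * k
  let off := nrows * ncols - m * n
  let rr := r - k
  let cc := c - k
  off + (if rr = 0 then cc
         else if cc = n - 1 then n - 1 + rr
         else if rr = m - 1 then n + m - 2 + (n - 1 - cc)
         else 2 * n + m - 3 + (m - 1 - rr))

-- the for-loop of B: keep first occurrences of in-grid cells (seen is the Python set)
def dedupInGrid (nrows ncols : Int) : List (Int × Int) → PySem.Set (Int × Int) → List (Int × Int)
  | [], _ => []
  | rc :: rest, seen =>
    if 0 ≤ rc.1 ∧ rc.1 < nrows ∧ 0 ≤ rc.2 ∧ rc.2 < ncols ∧ ¬ rc ∈ seen then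
      rc :: dedupInGrid nrows ncols rest (PySem.Set.add seen rc)
    else
      dedupInGrid nrows ncols rest seen

def shells_order_alt (nrows : Int) (ncols : Int) (holes_set : List (Int × Int)) : List (Int × Int) :=
  PySem.List.sorted (dedupInGrid nrows ncols holes_set PySem.Set.empty)
    (fun rc => spiralIndex nrows ncols rc.1 rc.2) false

-- ===== PRECONDITION & SPEC =====
def Spec_shells_order (nrows : Int) (ncols : Int) (holes_set : List (Int × Int)) (out : List (Int × Int)) : Prop := out = shells_order_alt nrows ncols holes_set
instance (nrows : Int) (ncols : Int) (holes_set : List (Int × Int)) (out : List (Int × Int)) : Decidable (Spec_shells_order nrows ncols holes_set out) := by unfold Spec_shells_order; infer_instance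

-- ===== CLAIM (what is proved, stated in full; the proofs are below) =====
def Claim_equal_shells_order : Prop := ∀ (nrows : Int) (ncols : Int) (holes_set : List (Int × Int)), Dom_shells_order nrows ncols holes_set → Spec_shells_order nrows ncols holes_set (shells_order nrows ncols holes_set)

-- ===== LEMMAS AND PROOFS =====

-- the cells of shell k of the spiral, in A's traversal order (unfiltered)
def shellCells (nrows ncols k : Int) : List (Int × Int) :=
  ((PySem.List.pyRange k (ncols - 1 - k + 1) 1).map (fun c => (k, c)))
  ++ ((PySem.List.pyRange (k + 1) (nrows - 1 - k + 1) 1).map (fun r => (r, ncols - 1 - k)))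
  ++ (if k < nrows - 1 - k then
        (PySem.List.pyRange (ncols - 1 - k - 1) (k - 1) (-1)).map (fun c => (nrows - 1 - k, c))
      else [])
  ++ (if k < ncols - 1 - k then
        (PySem.List.pyRange (nrows - 1 - k - 1) k (-1)).map (fun r => (r, k))
      else [])

def spiralCells (nrows ncols k : Int) : List (Int × Int) :=
  if k ≤ nrows - 1 - k ∧ k ≤ ncols - 1 - k then
    shellCells nrows ncols k ++ spiralCells nrows ncols (k + 1)
  else []
termination_by (nrows - 1 - k - k + 1).toNat
decreasing_by exact (Int.toNat_lt_toNat (by omega)).2 (by omega)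

def offK (nrows ncols k : Int) : Int := nrows * ncols - (nrows - 2 * k) * (ncols - 2 * k)

def shellOf (nrows ncols : Int) (x : Int × Int) : Int :=
  min (min (min x.1 x.2) (nrows - 1 - x.1)) (ncols - 1 - x.2)

def inGrid (nrows ncols : Int) (x : Int × Int) : Prop :=
  0 ≤ x.1 ∧ x.1 < nrows ∧ 0 ≤ x.2 ∧ x.2 < ncols

lemma spiralIndex_shell (nrows ncols r c k : Int)
    (hk : min (min (min r c) (nrows - 1 - r)) (ncols - 1 - c) = k) :
    spiralIndex nrows ncols r c = offK nrows ncols k +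
      (if r - k = 0 then c - k
       else if c - k = ncols - 2 * k - 1 then ncols - 2 * k - 1 + (r - k)
       else if r - k = nrows - 2 * k - 1 then
         (ncols - 2 * k) + (nrows - 2 * k) - 2 + ((ncols - 2 * k) - 1 - (c - k))
       else 2 * (ncols - 2 * k) + (nrows - 2 * k) - 3 + ((nrows - 2 * k) - 1 - (r - k))) := by
  simp only [spiralIndex, offK, hk]

lemma loopA_eq (holes : List (Int × Int)) (nrows ncols : Int) :
    ∀ (fuel : Nat) (k : Int) (acc : List (Int × Int)), (nrows - 2 * k).toNat ≤ fuel →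
    shellsLoopA holes k (nrows - 1 - k) k (ncols - 1 - k) acc
      = acc ++ (spiralCells nrows ncols k).filter (fun x => decide (x ∈ holes)) := by
  intro fuel
  induction fuel with
  | zero =>
    intro k acc hf
    have hc : ¬ (k ≤ nrows - 1 - k ∧ k ≤ ncols - 1 - k) := by omega
    rw [shellsLoopA, if_neg hc, spiralCells, if_neg hc]
    simp
  | succ f ih =>
    intro k acc hf
    by_cases hc : k ≤ nrows - 1 - k ∧ k ≤ ncols - 1 - k
    · rw [shellsLoopA, if_pos hc]
      have e1 : nrows - 1 - k - 1 = nrows - 1 - (k + 1) := by ring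
      have e2 : ncols - 1 - k - 1 = ncols - 1 - (k + 1) := by ring
      simp only [PySem.List.foldl_append_ite]
      rw [e1, e2, ih (k + 1) _ (by omega)]
      have hsp : spiralCells nrows ncols k
          = shellCells nrows ncols k ++ spiralCells nrows ncols (k + 1) := by
        rw [spiralCells, if_pos hc]
      rw [hsp]
      simp only [shellCells, List.filter_append, List.filter_map, Function.comp_def,
        apply_ite (List.filter (fun x => decide (x ∈ holes))), List.filter_nil]
      split_ifs <;> simp [List.append_assoc, e1, e2]
    · rw [shellsLoopA, if_neg hc, spiralCells, if_neg hc]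
      simp

lemma idx_top (nrows ncols k c : Int) (h1 : k ≤ nrows - 1 - k)
    (hc1 : k ≤ c) (hc2 : c ≤ ncols - 1 - k) :
    spiralIndex nrows ncols k c = offK nrows ncols k + (c - k) := by
  rw [spiralIndex_shell nrows ncols k c k (by omega), if_pos (by omega)]

lemma idx_right (nrows ncols k r : Int) (h2 : k ≤ ncols - 1 - k)
    (hr1 : k + 1 ≤ r) (hr2 : r ≤ nrows - 1 - k) :
    spiralIndex nrows ncols r (ncols - 1 - k)
      = offK nrows ncols k + (ncols - 2 * k - 1) + (r - k) := by
  rw [spiralIndex_shell nrows ncols r (ncols - 1 - k) k (by omega),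
    if_neg (by omega), if_pos (by omega)]
  ring

lemma idx_bottom (nrows ncols k c : Int) (h1 : k < nrows - 1 - k)
    (hc1 : k ≤ c) (hc2 : c ≤ ncols - 2 - k) :
    spiralIndex nrows ncols (nrows - 1 - k) c
      = offK nrows ncols k + (ncols - 2 * k) + (nrows - 2 * k) - 2 + (ncols - 1 - k - c) := by
  rw [spiralIndex_shell nrows ncols (nrows - 1 - k) c k (by omega),
    if_neg (by omega), if_neg (by omega), if_pos (by omega)]
  ring

lemma idx_left (nrows ncols k r : Int) (h2 : k < ncols - 1 - k)
    (hr1 : k + 1 ≤ r) (hr2 : r ≤ nrows - 2 - k) :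
    spiralIndex nrows ncols r k
      = offK nrows ncols k + 2 * (ncols - 2 * k) + (nrows - 2 * k) - 3 + (nrows - 1 - k - r) := by
  rw [spiralIndex_shell nrows ncols r k k (by omega),
    if_neg (by omega), if_neg (by omega), if_neg (by omega)]
  ring

lemma offK_succ (nrows ncols k : Int) :
    offK nrows ncols (k + 1) = offK nrows ncols k + 2 * (nrows - 2 * k) + 2 * (ncols - 2 * k) - 4 := by
  unfold offK; ring

-- membership in shell k
lemma mem_shellCells (nrows ncols k : Int) (x : Int × Int) (h0 : 0 ≤ k)
    (h1 : k ≤ nrows - 1 - k) (h2 : k ≤ ncols - 1 - k) :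
    x ∈ shellCells nrows ncols k ↔ inGrid nrows ncols x ∧ shellOf nrows ncols x = k := by
  obtain ⟨a, b⟩ := x
  simp only [shellCells, List.mem_append, List.mem_map, PySem.List.mem_pyRange_one,
    PySem.List.mem_pyRange_neg_one, List.mem_ite_nil_right, Prod.mk.injEq, inGrid, shellOf]
  constructor
  · rintro (((⟨c, hc, rfl, rfl⟩ | ⟨r, hr, rfl, rfl⟩) | ⟨hb, c, hc, rfl, rfl⟩) |
      ⟨hl, r, hr, rfl, rfl⟩) <;> refine ⟨by omega, by omega⟩
  · rintro ⟨⟨hg1, hg2, hg3, hg4⟩, hsh⟩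
    by_cases h1a : a = k
    · exact Or.inl (Or.inl (Or.inl ⟨b, ⟨by omega, by omega⟩, by omega, rfl⟩))
    by_cases h2b : b = ncols - 1 - k
    · exact Or.inl (Or.inl (Or.inr ⟨a, ⟨by omega, by omega⟩, rfl, by omega⟩))
    by_cases h3a : a = nrows - 1 - k
    · exact Or.inl (Or.inr ⟨by omega, b, ⟨by omega, by omega⟩, by omega, rfl⟩)
    · exact Or.inr ⟨by omega, a, ⟨by omega, by omega⟩, rfl, by omega⟩

-- lower bound of spiralIndex on shell k
lemma shell_lb (nrows ncols k : Int) (h0 : 0 ≤ k)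
    (h1 : k ≤ nrows - 1 - k) (h2 : k ≤ ncols - 1 - k) :
    ∀ x ∈ shellCells nrows ncols k,
      offK nrows ncols k ≤ spiralIndex nrows ncols x.1 x.2 := by
  intro x hx
  obtain ⟨a, b⟩ := x
  obtain ⟨⟨hg1, hg2, hg3, hg4⟩, hsh⟩ := (mem_shellCells nrows ncols k (a, b) h0 h1 h2).1 hx
  simp only [shellOf] at hsh
  rw [spiralIndex_shell nrows ncols a b k hsh]
  split_ifs <;> omega

-- upper bound, strict below the next shell's offset (inner shell nonempty)
lemma shell_ub (nrows ncols k : Int) (h0 : 0 ≤ k)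
    (h1 : k + 1 ≤ nrows - 1 - (k + 1)) (h2 : k + 1 ≤ ncols - 1 - (k + 1)) :
    ∀ x ∈ shellCells nrows ncols k,
      spiralIndex nrows ncols x.1 x.2
        ≤ offK nrows ncols k + 2 * (ncols - 2 * k) + 2 * (nrows - 2 * k) - 5 := by
  intro x hx
  obtain ⟨a, b⟩ := x
  obtain ⟨⟨hg1, hg2, hg3, hg4⟩, hsh⟩ :=
    (mem_shellCells nrows ncols k (a, b) h0 (by omega) (by omega)).1 hx
  simp only [shellOf] at hsh
  rw [spiralIndex_shell nrows ncols a b k hsh]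
  split_ifs <;> omega

lemma pairwise_map_pyRange_one (a b : Int) (f : Int → Int × Int) (R : Int × Int → Int × Int → Prop)
    (h : ∀ c c', a ≤ c → c < b → a ≤ c' → c' < b → c < c' → R (f c) (f c')) :
    ((PySem.List.pyRange a b 1).map f).Pairwise R := by
  rw [List.pairwise_map]
  refine List.Pairwise.imp_of_mem ?_ (PySem.List.pairwise_lt_pyRange_one a b)
  intro c c' hc hc' hlt
  rw [PySem.List.mem_pyRange_one] at hc hc'
  exact h c c' hc.1 hc.2 hc'.1 hc'.2 hlt

lemma pairwise_map_pyRange_neg (a b : Int) (f : Int → Int × Int) (R : Int × Int → Int × Int → Prop)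
    (h : ∀ c c', b < c → c ≤ a → b < c' → c' ≤ a → c' < c → R (f c) (f c')) :
    ((PySem.List.pyRange a b (-1)).map f).Pairwise R := by
  rw [List.pairwise_map, PySem.List.pyRange_neg_one_eq_reverse, List.pairwise_reverse]
  refine List.Pairwise.imp_of_mem ?_ (PySem.List.pairwise_lt_pyRange_one (b + 1) (a + 1))
  intro c c' hc hc' hlt
  rw [PySem.List.mem_pyRange_one] at hc hc'
  exact h c' c (by omega) (by omega) (by omega) (by omega) hlt

-- spiralIndex is strictly increasing along shell k's traversal order
lemma shell_pairwise (nrows ncols k : Int)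
    (h1 : k ≤ nrows - 1 - k) (h2 : k ≤ ncols - 1 - k) :
    (shellCells nrows ncols k).Pairwise
      (fun x y => spiralIndex nrows ncols x.1 x.2 < spiralIndex nrows ncols y.1 y.2) := by
  have hub1 : ∀ x ∈ ((PySem.List.pyRange k (ncols - 1 - k + 1) 1).map (fun c => (k, c))),
      offK nrows ncols k ≤ spiralIndex nrows ncols x.1 x.2 ∧
      spiralIndex nrows ncols x.1 x.2 ≤ offK nrows ncols k + (ncols - 2 * k) - 1 := by
    intro x hx
    simp only [List.mem_map, PySem.List.mem_pyRange_one] at hx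
    obtain ⟨c, hc, rfl⟩ := hx
    rw [idx_top nrows ncols k c h1 (by omega) (by omega)]; omega
  have hub2 : ∀ x ∈ ((PySem.List.pyRange (k + 1) (nrows - 1 - k + 1) 1).map
        (fun r => (r, ncols - 1 - k))),
      offK nrows ncols k + (ncols - 2 * k) ≤ spiralIndex nrows ncols x.1 x.2 ∧
      spiralIndex nrows ncols x.1 x.2
        ≤ offK nrows ncols k + (ncols - 2 * k) + (nrows - 2 * k) - 2 := by
    intro x hx
    simp only [List.mem_map, PySem.List.mem_pyRange_one] at hx
    obtain ⟨r, hr, rfl⟩ := hx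
    rw [idx_right nrows ncols k r h2 (by omega) (by omega)]; omega
  have hub3 : ∀ x ∈ (if k < nrows - 1 - k then
        (PySem.List.pyRange (ncols - 1 - k - 1) (k - 1) (-1)).map (fun c => (nrows - 1 - k, c))
      else []),
      offK nrows ncols k + (ncols - 2 * k) + (nrows - 2 * k) - 1 ≤ spiralIndex nrows ncols x.1 x.2 ∧
      spiralIndex nrows ncols x.1 x.2
        ≤ offK nrows ncols k + 2 * (ncols - 2 * k) + (nrows - 2 * k) - 3 := by
    intro x hx
    rw [List.mem_ite_nil_right] at hx
    obtain ⟨hcond, hx⟩ := hx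
    simp only [List.mem_map, PySem.List.mem_pyRange_neg_one] at hx
    obtain ⟨c, hc, rfl⟩ := hx
    rw [idx_bottom nrows ncols k c hcond (by omega) (by omega)]; omega
  have hub4 : ∀ x ∈ (if k < ncols - 1 - k then
        (PySem.List.pyRange (nrows - 1 - k - 1) k (-1)).map (fun r => (r, k))
      else []),
      offK nrows ncols k + 2 * (ncols - 2 * k) + (nrows - 2 * k) - 2
        ≤ spiralIndex nrows ncols x.1 x.2 := by
    intro x hx
    rw [List.mem_ite_nil_right] at hx
    obtain ⟨hcond, hx⟩ := hx
    simp only [List.mem_map, PySem.List.mem_pyRange_neg_one] at hx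
    obtain ⟨r, hr, rfl⟩ := hx
    rw [idx_left nrows ncols k r hcond (by omega) (by omega)]; omega
  unfold shellCells
  rw [List.pairwise_append, List.pairwise_append, List.pairwise_append]
  refine ⟨⟨⟨?_, ?_, ?_⟩, ?_, ?_⟩, ?_, ?_⟩
  · exact pairwise_map_pyRange_one _ _ _ _ (fun c c' l1 l2 l3 l4 l5 => by
      rw [idx_top nrows ncols k c h1 (by omega) (by omega),
        idx_top nrows ncols k c' h1 (by omega) (by omega)]; omega)
  · exact pairwise_map_pyRange_one _ _ _ _ (fun r r' l1 l2 l3 l4 l5 => by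
      rw [idx_right nrows ncols k r h2 (by omega) (by omega),
        idx_right nrows ncols k r' h2 (by omega) (by omega)]; omega)
  · intro x hx y hy
    have := hub1 x hx; have := hub2 y hy; omega
  · split_ifs with hcond
    · exact pairwise_map_pyRange_neg _ _ _ _ (fun c c' l1 l2 l3 l4 l5 => by
        rw [idx_bottom nrows ncols k c hcond (by omega) (by omega),
          idx_bottom nrows ncols k c' hcond (by omega) (by omega)]; omega)
    · exact List.Pairwise.nil
  · intro x hx y hy
    rw [List.mem_append] at hx
    rcases hx with hx | hx
    · have := hub1 x hx; have := hub3 y hy; omega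
    · have := hub2 x hx; have := hub3 y hy; omega
  · split_ifs with hcond
    · exact pairwise_map_pyRange_neg _ _ _ _ (fun r r' l1 l2 l3 l4 l5 => by
        rw [idx_left nrows ncols k r hcond (by omega) (by omega),
          idx_left nrows ncols k r' hcond (by omega) (by omega)]; omega)
    · exact List.Pairwise.nil
  · intro x hx y hy
    rw [List.mem_append, List.mem_append] at hx
    rcases hx with (hx | hx) | hx
    · have := hub1 x hx; have := hub4 y hy; omega
    · have := hub2 x hx; have := hub4 y hy; omega
    · have := hub3 x hx; have := hub4 y hy; omega

lemma spiral_mem_pairwise (nrows ncols : Int) : ∀ (fuel : Nat) (k : Int),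
    (nrows - 2 * k).toNat ≤ fuel → 0 ≤ k →
    ((∀ x, x ∈ spiralCells nrows ncols k ↔ inGrid nrows ncols x ∧ k ≤ shellOf nrows ncols x) ∧
     (∀ x ∈ spiralCells nrows ncols k, offK nrows ncols k ≤ spiralIndex nrows ncols x.1 x.2) ∧
     (spiralCells nrows ncols k).Pairwise
       (fun x y => spiralIndex nrows ncols x.1 x.2 < spiralIndex nrows ncols y.1 y.2)) := by
  intro fuel
  induction fuel with
  | zero =>
    intro k hf h0
    have hc : ¬ (k ≤ nrows - 1 - k ∧ k ≤ ncols - 1 - k) := by omega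
    rw [spiralCells, if_neg hc]
    refine ⟨?_, by simp, List.Pairwise.nil⟩
    intro ⟨a, b⟩
    simp only [List.not_mem_nil, false_iff, inGrid, shellOf]
    omega
  | succ f ih =>
    intro k hf h0
    by_cases hc : k ≤ nrows - 1 - k ∧ k ≤ ncols - 1 - k
    · rw [spiralCells, if_pos hc]
      obtain ⟨ihm, ihlb, ihpw⟩ := ih (k + 1) (by omega) (by omega)
      have hsucc := offK_succ nrows ncols k
      refine ⟨?_, ?_, ?_⟩
      · intro x
        rw [List.mem_append, mem_shellCells nrows ncols k x h0 hc.1 hc.2, ihm x]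
        obtain ⟨a, b⟩ := x
        simp only [inGrid, shellOf]
        constructor
        · rintro (⟨hg, hsh⟩ | ⟨hg, hsh⟩) <;> exact ⟨hg, by omega⟩
        · rintro ⟨hg, hsh⟩
          by_cases hek : shellOf nrows ncols (a, b) = k
          · simp only [shellOf] at hek
            exact Or.inl ⟨hg, hek⟩
          · simp only [shellOf] at hek
            exact Or.inr ⟨hg, by omega⟩
      · intro x hx
        rw [List.mem_append] at hx
        rcases hx with hx | hx
        · exact shell_lb nrows ncols k h0 hc.1 hc.2 x hx
        · have := ihlb x hx; omega
      · rw [List.pairwise_append]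
        refine ⟨shell_pairwise nrows ncols k hc.1 hc.2, ihpw, ?_⟩
        intro x hx y hy
        have hyg := (ihm y).1 hy
        have hcond1 : k + 1 ≤ nrows - 1 - (k + 1) ∧ k + 1 ≤ ncols - 1 - (k + 1) := by
          obtain ⟨⟨m1, m2, m3, m4⟩, m5⟩ := hyg
          simp only [shellOf] at m5
          omega
        have hub := shell_ub nrows ncols k h0 hcond1.1 hcond1.2 x hx
        have hlb := ihlb y hy
        omega
    · rw [spiralCells, if_neg hc]
      refine ⟨?_, by simp, List.Pairwise.nil⟩
      intro ⟨a, b⟩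
      simp only [List.not_mem_nil, false_iff, inGrid, shellOf]
      omega

lemma dedup_mem (nrows ncols : Int) : ∀ (holes : List (Int × Int)) (seen : PySem.Set (Int × Int))
    (x : Int × Int), x ∈ dedupInGrid nrows ncols holes seen ↔
      x ∈ holes ∧ inGrid nrows ncols x ∧ ¬ x ∈ seen := by
  intro holes
  induction holes with
  | nil => intro seen x; simp [dedupInGrid]
  | cons rc rest ih =>
    intro seen x
    rw [dedupInGrid]
    split_ifs with h
    · rw [List.mem_cons, ih, List.mem_cons, PySem.Set.mem_add]
      unfold inGrid
      by_cases hx : x = rc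
      · subst hx; constructor
        · intro _; exact ⟨Or.inl rfl, ⟨h.1, h.2.1, h.2.2.1, h.2.2.2.1⟩, h.2.2.2.2⟩
        · intro _; exact Or.inl rfl
      · constructor
        · rintro (rfl | ⟨hm, hg, hs⟩)
          · exact absurd rfl hx
          · exact ⟨Or.inr hm, hg, fun hh => hs (Or.inl hh)⟩
        · rintro ⟨rfl | hm, hg, hs⟩
          · exact absurd rfl hx
          · exact Or.inr ⟨hm, hg, fun hh => hs.elim (hh.elim (fun a => a) (fun a => absurd a hx))⟩
    · rw [ih, List.mem_cons]
      unfold inGrid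
      by_cases hx : x = rc
      · subst hx
        constructor
        · rintro ⟨hm, hg, hs⟩; exact ⟨Or.inr hm, hg, hs⟩
        · rintro ⟨_, hg, hs⟩; exact absurd ⟨hg.1, hg.2.1, hg.2.2.1, hg.2.2.2, hs⟩ h
      · constructor
        · rintro ⟨hm, hg, hs⟩; exact ⟨Or.inr hm, hg, hs⟩
        · rintro ⟨rfl | hm, hg, hs⟩
          · exact absurd rfl hx
          · exact ⟨hm, hg, hs⟩

lemma dedup_nodup (nrows ncols : Int) : ∀ (holes : List (Int × Int)) (seen : PySem.Set (Int × Int)),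
    (dedupInGrid nrows ncols holes seen).Nodup := by
  intro holes
  induction holes with
  | nil => intro seen; simp [dedupInGrid]
  | cons rc rest ih =>
    intro seen
    rw [dedupInGrid]
    split_ifs with h
    · refine List.Nodup.cons ?_ (ih _)
      intro hmem
      have := (dedup_mem nrows ncols rest (PySem.Set.add seen rc) rc).1 hmem
      exact this.2.2 ((PySem.Set.mem_add _ _ _).2 (Or.inr rfl))
    · exact ih _

-- ===== VERDICT (by name: the statement is the Claim_ definition above) =====
theorem shells_order_spec : Claim_equal_shells_order := by
  intro nrows ncols holes _
  unfold Spec_shells_order shells_order shells_order_alt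
  have e0r : nrows - 1 = nrows - 1 - 0 := by ring
  have e0c : ncols - 1 = ncols - 1 - 0 := by ring
  rw [e0r, e0c, loopA_eq holes nrows ncols (nrows - 2 * 0).toNat 0 [] (le_refl _)]
  simp only [List.nil_append]
  obtain ⟨hm, hlb, hpw⟩ :=
    spiral_mem_pairwise nrows ncols (nrows - 2 * 0).toNat 0 (le_refl _) (le_refl 0)
  have hFnodup : ((spiralCells nrows ncols 0).filter (fun x => decide (x ∈ holes))).Nodup := by
    refine List.Nodup.sublist List.filter_sublist ?_
    exact hpw.imp (fun {a b} h he => by subst he; exact lt_irrefl _ h)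
  have hdnodup := dedup_nodup nrows ncols holes PySem.Set.empty
  have hperm : ((spiralCells nrows ncols 0).filter (fun x => decide (x ∈ holes))).Perm
      (dedupInGrid nrows ncols holes PySem.Set.empty) := by
    rw [List.perm_ext_iff_of_nodup hFnodup hdnodup]
    intro x
    rw [List.mem_filter, hm x, dedup_mem nrows ncols holes PySem.Set.empty x]
    obtain ⟨a, b⟩ := x
    simp only [decide_eq_true_eq, inGrid, shellOf, PySem.Set.empty, List.not_mem_nil,
      not_false_eq_true, and_true]
    constructor
    · rintro ⟨⟨hg, hsh⟩, hmem⟩; exact ⟨hmem, hg⟩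
    · rintro ⟨hmem, hg⟩; exact ⟨⟨hg, by omega⟩, hmem⟩
  exact (PySem.List.sorted_eq_of_perm_of_pairwise_lt _ _
    (fun rc : Int × Int => spiralIndex nrows ncols rc.1 rc.2) hperm
    (hpw.sublist List.filter_sublist)).symm
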